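-- pv_equiv track=rewrite | github.com/Hyebin1022/- | 프로그래머스/unrated/181854. 배열의 길이에 따라 다른 연산하기/배열의 길이에 따라 다른 연산하기.py | solution
-- ===== SOURCE A (Python) =====
-- def solution(arr, n):
--     answer = []
--     for a, b in enumerate(arr):
--         if len(arr) % 2 == 1:
--             if a % 2 == 0:
--                 answer.append(b + n)
--             else:
--                 answer.append(b)
--         else:
--             if a % 2 == 0:
--                 answer.append(b)
--             else:
--                 answer.append(b + n)
--     return answer
-- ===== SOURCE B (Python) =====
-- def solution(arr, n):
--     # Pairwise decomposition: if the length is odd, peel off the first element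
--     # with n added; the remainder has even length, so walk it pair by pair via
--     # zip(it, it), adding n to the second member of each pair. No per-element
--     # index or parity test.
--     if len(arr) % 2 == 1:
--         out = [arr[0] + n]
--         rest = arr[1:]
--     else:
--         out = []
--         rest = arr
--     it = iter(rest)
--     for x, y in zip(it, it):
--         out += [x, y + n]
--     return out
-- ===== Notes on version B (the rewrite author's own statement) =====
-- stated objective: alternative
-- what changed: Replaces the indexed single pass with per-element parity branches by a pairwise decomposition: peel off the first element (with n added) when the length is odd, then iterate the even-length remainder two at a time via zip(it, it), adding n to the second member of each pair; no index or parity test per element.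
import Mathlib
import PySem

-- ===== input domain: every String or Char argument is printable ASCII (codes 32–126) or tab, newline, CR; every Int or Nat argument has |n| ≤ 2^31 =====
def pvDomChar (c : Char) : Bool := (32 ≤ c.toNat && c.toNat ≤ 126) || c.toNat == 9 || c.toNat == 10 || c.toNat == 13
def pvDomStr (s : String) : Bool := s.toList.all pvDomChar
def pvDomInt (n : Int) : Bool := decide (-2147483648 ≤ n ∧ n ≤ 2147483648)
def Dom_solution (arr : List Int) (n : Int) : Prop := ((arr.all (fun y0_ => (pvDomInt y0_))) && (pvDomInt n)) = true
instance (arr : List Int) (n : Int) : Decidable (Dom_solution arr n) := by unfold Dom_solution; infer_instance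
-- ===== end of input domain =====

-- B replaces A's indexed pass with per-element parity branches by a pairwise
-- decomposition (peel the first element, plus n, when the length is odd, then
-- walk the even-length rest pair by pair via zip(it, it), adding n to the
-- second of each pair); objective: alternative.

-- ===== PORT A =====
def solution (arr : List Int) (n : Int) : List Int :=
  (PySem.List.enumerate arr).foldl
    (fun answer p =>
      if PySem.Int.mod (arr.length : Int) 2 == 1 then
        if PySem.Int.mod p.1 2 == 0 then answer ++ [p.2 + n] else answer ++ [p.2]
      else
        if PySem.Int.mod p.1 2 == 0 then answer ++ [p.2] else answer ++ [p.2 + n])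
    []

-- ===== PORT B =====
-- pairs models zip(it, it) on a list: consecutive disjoint pairs (a trailing
-- odd element is dropped, as zip stops)
def pairs : List Int → List (Int × Int)
  | x :: y :: rest => (x, y) :: pairs rest
  | _ => []

def solution_alt (arr : List Int) (n : Int) : List Int :=
  let (out, rest) :=
    if PySem.Int.mod (arr.length : Int) 2 == 1 then
      match arr with
      | [] => (([] : List Int), ([] : List Int))   -- unreachable: odd length means arr ≠ []
      | x :: r => ([x + n], r)
    else (([] : List Int), arr)
  (pairs rest).foldl (fun out p => out ++ [p.1, p.2 + n]) out

-- ===== PRECONDITION & SPEC =====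
def Spec_solution (arr : List Int) (n : Int) (out : List Int) : Prop := out = solution_alt arr n
instance (arr : List Int) (n : Int) (out : List Int) : Decidable (Spec_solution arr n out) := by unfold Spec_solution; infer_instance

-- ===== CLAIM (what is proved, stated in full; the proofs are below) =====
def Claim_equal_solution : Prop := ∀ (arr : List Int) (n : Int), Dom_solution arr n → Spec_solution arr n (solution arr n)

-- ===== LEMMAS AND PROOFS =====

-- per-element agreement of A's branch with the arithmetic form
theorem solution_cell (a L b n : Int) (_ha : 0 ≤ a) (_hL : 0 ≤ L) :
    (if PySem.Int.mod L 2 == 1 then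
        if PySem.Int.mod a 2 == 0 then b + n else b
      else
        if PySem.Int.mod a 2 == 0 then b else b + n)
    = b + n * PySem.Int.mod (a + L) 2 := by
  simp only [PySem.Int.mod_eq_emod_of_pos (show (0:Int) < 2 by norm_num)]
  rcases Int.emod_two_eq a with h1 | h1 <;> rcases Int.emod_two_eq L with h2 | h2 <;>
    simp only [h1, h2] <;> norm_num <;>
    (try (have h3 : (a + L) % 2 = 1 := by omega
          rw [h3]; ring)) <;>
    omega

-- A's fold with appends equals a map of the arithmetic form
theorem solution_fold (xs : List Int) (L n : Int) (hL : 0 ≤ L) :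
    ∀ (s : Int), 0 ≤ s → ∀ (acc : List Int),
    (PySem.List.enumerate xs s).foldl
      (fun answer p =>
        if PySem.Int.mod L 2 == 1 then
          if PySem.Int.mod p.1 2 == 0 then answer ++ [p.2 + n] else answer ++ [p.2]
        else
          if PySem.Int.mod p.1 2 == 0 then answer ++ [p.2] else answer ++ [p.2 + n])
      acc
    = acc ++ (PySem.List.enumerate xs s).map (fun p => p.2 + n * PySem.Int.mod (p.1 + L) 2) := by
  induction xs with
  | nil => intro s hs acc; simp [PySem.List.enumerate_nil]
  | cons x xs ih =>
    intro s hs acc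
    rw [PySem.List.enumerate_cons, List.foldl_cons, List.map_cons]
    have hstep :
        (if PySem.Int.mod L 2 == 1 then
            if PySem.Int.mod s 2 == 0 then acc ++ [x + n] else acc ++ [x]
          else
            if PySem.Int.mod s 2 == 0 then acc ++ [x] else acc ++ [x + n])
        = acc ++ [if PySem.Int.mod L 2 == 1 then
            (if PySem.Int.mod s 2 == 0 then x + n else x)
          else
            (if PySem.Int.mod s 2 == 0 then x else x + n)] := by
      split_ifs <;> rfl
    simp only [hstep, solution_cell s L x n hs hL, ih (s + 1) (by omega)]
    simp

-- B's pairwise fold equals the same map on even-length lists, for any start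
-- index s and accumulator: the element at index s gets +0, at s+1 gets +n, …
theorem pairsFold_eq (n : Int) : (xs : List Int) → xs.length % 2 = 0 → (s : Int) →
    (acc : List Int) →
    (pairs xs).foldl (fun out p => out ++ [p.1, p.2 + n]) acc
      = acc ++ (PySem.List.enumerate xs s).map (fun p => p.2 + n * PySem.Int.mod (p.1 + s) 2)
  | [], _, s, acc => by simp [pairs, PySem.List.enumerate_nil]
  | [x], h, s, acc => by simp at h
  | x :: y :: rest, h, s, acc => by
    have h0 : PySem.Int.mod (s + s) 2 = 0 := by
      rw [PySem.Int.mod_eq_emod_of_pos (by norm_num)]; omega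
    have h1 : PySem.Int.mod (s + 1 + s) 2 = 1 := by
      rw [PySem.Int.mod_eq_emod_of_pos (by norm_num)]; omega
    have hshift : ∀ i : Int, PySem.Int.mod (i + s) 2 = PySem.Int.mod (i + (s + 1 + 1)) 2 := by
      intro i
      rw [PySem.Int.mod_eq_emod_of_pos (by norm_num),
          PySem.Int.mod_eq_emod_of_pos (by norm_num)]
      omega
    have hr : rest.length % 2 = 0 := by simp at h ⊢; omega
    simp only [pairs, List.foldl_cons, PySem.List.enumerate_cons, List.map_cons,
      h0, h1, mul_zero, add_zero, mul_one,
      pairsFold_eq n rest hr (s + 1 + 1) (acc ++ [x, y + n])]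
    rw [List.append_assoc]
    refine congrArg (acc ++ ·) ?_
    simp only [List.cons_append, List.nil_append]
    refine List.cons_eq_cons.mpr ⟨rfl, List.cons_eq_cons.mpr ⟨rfl, ?_⟩⟩
    exact List.map_congr_left (fun p _ => by rw [hshift p.1])

-- parity of an int can be transported through Python mod
theorem mod_shift_even (L : Int) (hL : L % 2 = 0) (i : Int) :
    PySem.Int.mod (i + L) 2 = PySem.Int.mod (i + 0) 2 := by
  rw [PySem.Int.mod_eq_emod_of_pos (by norm_num),
      PySem.Int.mod_eq_emod_of_pos (by norm_num)]
  omega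

theorem mod_shift_odd (L : Int) (hL : L % 2 = 1) (i : Int) :
    PySem.Int.mod (i + L) 2 = PySem.Int.mod (i + 1) 2 := by
  rw [PySem.Int.mod_eq_emod_of_pos (by norm_num),
      PySem.Int.mod_eq_emod_of_pos (by norm_num)]
  omega

-- ===== VERDICT (by name: the statement is the Claim_ definition above) =====
theorem solution_spec : Claim_equal_solution := by
  intro arr n _
  show solution arr n = solution_alt arr n
  unfold solution solution_alt
  rw [solution_fold arr (arr.length : Int) n (by positivity) 0 le_rfl []]
  simp only [List.nil_append]
  have hmod : PySem.Int.mod (arr.length : Int) 2 = (arr.length : Int) % 2 :=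
    PySem.Int.mod_eq_emod_of_pos (by norm_num)
  by_cases hodd : ((arr.length : Int)) % 2 = 1
  · rw [if_pos (by rw [hmod]; simp [hodd])]
    match arr with
    | [] => simp at hodd
    | x :: rest =>
      have hr : rest.length % 2 = 0 := by
        simp only [List.length_cons] at hodd
        omega
      simp only [pairsFold_eq n rest hr 1 [x + n]]
      rw [PySem.List.enumerate_cons, List.map_cons]
      have h1 : PySem.Int.mod (((x :: rest).length : Int)) 2 = 1 := by
        rw [PySem.Int.mod_eq_emod_of_pos (by norm_num)]; omega
      simp only [zero_add]
      refine List.cons_eq_cons.mpr ⟨by rw [h1]; ring, ?_⟩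
      · exact List.map_congr_left (fun p _ =>
          by rw [mod_shift_odd _ (by omega) p.1])
  · have heven : ((arr.length : Int)) % 2 = 0 := by omega
    have hr : arr.length % 2 = 0 := by omega
    rw [if_neg (by rw [hmod]; simp [heven]),
        pairsFold_eq n arr hr 0 []]
    simp only [List.nil_append]
    exact List.map_congr_left (fun p _ => by
      rw [mod_shift_even _ heven p.1])
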